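-- pv_equiv track=rewrite | github.com/Sfera-IT/adventofcode2020 | maramazza/py/10.py | find_distinct_ways
-- ===== SOURCE A (Python) =====
-- from collections import Counter, defaultdict
--
-- def find_distinct_ways(i, data):
--     ways = defaultdict(int)
--     ways[0] = 1
--     for i, adapter in enumerate(data):
--         if i != 0:
--             ways[adapter] = ways[adapter - 1] + \
--                 ways[adapter - 2] + ways[adapter - 3]
--     return ways[data[-1]]
-- ===== SOURCE B (Python) =====
-- def find_distinct_ways(i, data):
--     n = len(data)
--     # Phase 1: build, for each position, the earlier positions whose count feeds it.
--     # last maps a joltage to the position currently carrying its count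
--     # (position 0 stands for the outlet at joltage 0, which has one arrangement).
--     last = {0: 0}
--     preds = [[] for _ in range(n)]
--     for j in range(1, n):
--         a = data[j]
--         preds[j] = [last[a - d] for d in (1, 2, 3) if a - d in last]
--         last[a] = j
--     # Phase 2: accumulate arrangement counts along the predecessor graph.
--     counts = [1] + [0] * (n - 1)
--     for j in range(1, n):
--         counts[j] = sum(counts[p] for p in preds[j])
--     end = last.get(data[-1])
--     return counts[end] if end is not None else 0
-- ===== Notes on version B (the rewrite author's own statement) =====
-- stated objective: alternative
-- what changed: Replaces A's single pass over a joltage-keyed count dict by a two-phase computation: phase 1 builds an explicit predecessor-position graph (each position records which earlier positions feed it, via a last-seen-position index), phase 2 accumulates arrangement counts positionally along that graph; Pre_ excludes only the empty list, on which A raises IndexError at data[-1].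
import Mathlib
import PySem

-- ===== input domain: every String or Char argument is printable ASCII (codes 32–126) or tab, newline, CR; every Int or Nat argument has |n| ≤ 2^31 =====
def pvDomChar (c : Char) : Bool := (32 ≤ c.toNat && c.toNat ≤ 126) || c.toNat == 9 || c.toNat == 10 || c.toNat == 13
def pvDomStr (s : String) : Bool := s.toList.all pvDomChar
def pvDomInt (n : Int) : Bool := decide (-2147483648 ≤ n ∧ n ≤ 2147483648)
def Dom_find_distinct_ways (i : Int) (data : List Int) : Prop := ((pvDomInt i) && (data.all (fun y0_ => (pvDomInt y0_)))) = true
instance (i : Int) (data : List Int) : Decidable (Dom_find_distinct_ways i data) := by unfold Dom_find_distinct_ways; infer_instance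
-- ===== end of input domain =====

-- B replaces A's one-pass joltage-keyed count dict by two phases: build a
-- predecessor-position graph, then accumulate counts positionally (objective: alternative).

-- ===== PORT A =====
def find_distinct_ways (i : Int) (data : List Int) : Int :=
  let ways : PySem.Dict Int Int := (PySem.Dict.empty).insert 0 1
  let ways := (PySem.List.enumerate data).foldl (fun w (p : Int × Int) =>
    if p.1 ≠ 0 then
      w.insert p.2 (w.getD (p.2 - 1) 0 + w.getD (p.2 - 2) 0 + w.getD (p.2 - 3) 0)
    else w) ways
  match PySem.List.pyGet? data (-1) with
  | some last => ways.getD last 0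
  | none => 0   -- data = []: Python raises IndexError; excluded by Pre_

-- ===== PORT B =====
def find_distinct_ways_alt (i : Int) (data : List Int) : Int :=
  let n := data.length
  -- phase 1: last-seen-position index and per-position predecessor lists
  let st := (PySem.List.pyRange 1 (n : Int) 1).foldl
    (fun (st : PySem.Dict Int Int × List (List Int)) j =>
      let a := PySem.List.pyGetD data j 0
      let ps := ([1, 2, 3] : List Int).filterMap (fun d => st.1.get? (a - d))
      (st.1.insert a j, st.2.set j.toNat ps))
    ((PySem.Dict.empty).insert 0 0, List.replicate n [])
  -- phase 2: accumulate counts along the predecessor graph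
  let counts := (PySem.List.pyRange 1 (n : Int) 1).foldl
    (fun (c : List Int) j =>
      c.set j.toNat (((PySem.List.pyGetD st.2 j []).map
        (fun p => PySem.List.pyGetD c p 0)).sum))
    ((1 : Int) :: List.replicate (n - 1) 0)
  match PySem.List.pyGet? data (-1) with
  | some lastv =>
    match st.1.get? lastv with
    | some e => PySem.List.pyGetD counts e 0
    | none => 0
  | none => 0   -- data = []: Python raises IndexError; excluded by Pre_

-- ===== PRECONDITION & SPEC =====
-- Pre_ excludes only the empty list, on which A raises IndexError at data[-1].
def Pre_find_distinct_ways (i : Int) (data : List Int) : Prop := data ≠ []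
instance (i : Int) (data : List Int) : Decidable (Pre_find_distinct_ways i data) := by
  unfold Pre_find_distinct_ways; infer_instance
def pvWitness_find_distinct_ways : Int × List Int := (0, [0, 1, 2, 4])

def Spec_find_distinct_ways (i : Int) (data : List Int) (out : Int) : Prop :=
  out = find_distinct_ways_alt i data
instance (i : Int) (data : List Int) (out : Int) : Decidable (Spec_find_distinct_ways i data out) := by
  unfold Spec_find_distinct_ways; infer_instance

-- ===== CLAIM (what is proved, stated in full; the proofs are below) =====
def Claim_equal_find_distinct_ways : Prop := ∀ (i : Int) (data : List Int), Dom_find_distinct_ways i data → Pre_find_distinct_ways i data → Spec_find_distinct_ways i data (find_distinct_ways i data)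

-- ===== LEMMAS AND PROOFS =====

-- A's dict after processing indices 1..m
def pvA (data : List Int) : Nat → PySem.Dict Int Int
  | 0 => (PySem.Dict.empty).insert 0 1
  | m + 1 =>
    (pvA data m).insert (data.getD (m + 1) 0)
      ((pvA data m).getD (data.getD (m + 1) 0 - 1) 0 +
       (pvA data m).getD (data.getD (m + 1) 0 - 2) 0 +
       (pvA data m).getD (data.getD (m + 1) 0 - 3) 0)

-- B's last-seen-position index after processing indices 1..m
def pvL (data : List Int) : Nat → PySem.Dict Int Int
  | 0 => (PySem.Dict.empty).insert 0 0
  | m + 1 => (pvL data m).insert (data.getD (m + 1) 0) ((m + 1 : Nat) : Int)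

-- predecessor list computed at step m+1
def pvPs (data : List Int) (m : Nat) : List Int :=
  ([1, 2, 3] : List Int).filterMap (fun d => (pvL data m).get? (data.getD (m + 1) 0 - d))

-- B's predecessor-list table after processing indices 1..m
def pvP (data : List Int) : Nat → List (List Int)
  | 0 => List.replicate data.length []
  | m + 1 => (pvP data m).set (m + 1) (pvPs data m)

-- B's counts after processing indices 1..m
def pvC (data : List Int) : Nat → List Int
  | 0 => (1 : Int) :: List.replicate (data.length - 1) 0
  | m + 1 => (pvC data m).set (m + 1)
      (((pvPs data m).map (fun p => PySem.List.pyGetD (pvC data m) p 0)).sum)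

theorem pvC_length (data : List Int) (m : Nat) (h : data ≠ []) :
    (pvC data m).length = data.length := by
  induction m with
  | zero =>
    simp [pvC]
    cases data with
    | nil => exact absurd rfl h
    | cons x xs => simp
  | succ m ih => simp [pvC, ih]

theorem pvP_length (data : List Int) (m : Nat) :
    (pvP data m).length = data.length := by
  induction m with
  | zero => simp [pvP]
  | succ m ih => simp [pvP, ih]

-- positions stored in the index are casts of nats ≤ m
theorem pvL_bound (data : List Int) (m : Nat) (v p : Int)
    (h : (pvL data m).get? v = some p) : ∃ k : Nat, p = (k : Int) ∧ k ≤ m := by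
  induction m with
  | zero =>
    simp only [pvL, PySem.Dict.get?_insert, PySem.Dict.get?_empty] at h
    split at h
    · exact ⟨0, by simpa using h.symm, le_refl 0⟩
    · cases h
  | succ m ih =>
    simp only [pvL, PySem.Dict.get?_insert] at h
    split at h
    · exact ⟨m + 1, by simpa using h.symm, le_refl (m + 1)⟩
    · obtain ⟨k, rfl, hk⟩ := ih h
      exact ⟨k, rfl, by omega⟩

-- counts entries are frozen once written
theorem pvC_stable (data : List Int) (k m m' : Nat) (hk : k ≤ m) (hm : m ≤ m') :
    (pvC data m').getD k 0 = (pvC data m).getD k 0 := by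
  induction m', hm using Nat.le_induction with
  | base => rfl
  | succ m' hmm' ih =>
    simp only [pvC]
    rw [List.getD_eq_getElem?_getD, List.getElem?_set_ne (by omega),
      ← List.getD_eq_getElem?_getD, ih]

-- the invariant: A's dict value at v = B's count at the position the index holds for v
theorem pv_invariant (data : List Int) (m : Nat) (hm : m < data.length) :
    ∀ v : Int, (pvA data m).getD v 0 =
      (match (pvL data m).get? v with
       | some p => PySem.List.pyGetD (pvC data m) p 0
       | none => 0) := by
  induction m with
  | zero =>
    intro v
    simp only [pvA, pvL, PySem.Dict.getD_insert, PySem.Dict.get?_insert,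
      PySem.Dict.getD_empty, PySem.Dict.get?_empty]
    by_cases hv : v = 0
    · simp [hv, pvC, PySem.List.pyGetD_ofNat']
    · simp [hv]
  | succ m ih =>
    intro v
    have hm' : m < data.length := by omega
    have hne : data ≠ [] := by intro h; subst h; simp at hm
    have hlen : (pvC data m).length = data.length := pvC_length data m hne
    simp only [pvA, pvL, PySem.Dict.getD_insert, PySem.Dict.get?_insert]
    by_cases hv : v = data.getD (m + 1) 0
    · rw [if_pos hv, if_pos hv]
      have hset : PySem.List.pyGetD (pvC data (m + 1)) ((m + 1 : Nat) : Int) 0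
          = ((pvPs data m).map (fun p => PySem.List.pyGetD (pvC data m) p 0)).sum := by
        rw [PySem.List.pyGetD_natCast]
        simp only [pvC]
        rw [List.getD_eq_getElem?_getD, List.getElem?_set_self (by omega)]
        rfl
      rw [show (match some ((m + 1 : Nat) : Int) with
            | some p => PySem.List.pyGetD (pvC data (m + 1)) p 0
            | none => 0)
          = PySem.List.pyGetD (pvC data (m + 1)) ((m + 1 : Nat) : Int) 0 from rfl, hset]
      have e1 := ih hm' (data.getD (m + 1) 0 - 1)
      have e2 := ih hm' (data.getD (m + 1) 0 - 2)
      have e3 := ih hm' (data.getD (m + 1) 0 - 3)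
      rcases h1 : (pvL data m).get? (data.getD (m + 1) 0 - 1) with _ | p1 <;>
        rcases h2 : (pvL data m).get? (data.getD (m + 1) 0 - 2) with _ | p2 <;>
          rcases h3 : (pvL data m).get? (data.getD (m + 1) 0 - 3) with _ | p3 <;>
            rw [h1] at e1 <;> rw [h2] at e2 <;> rw [h3] at e3 <;>
            simp only [] at e1 e2 e3 <;>
              simp only [pvPs, List.filterMap, h1, h2, h3, List.map_cons, List.map_nil,
                List.sum_cons, List.sum_nil] <;>
                rw [e1, e2, e3] <;> omega
    · rw [if_neg hv, if_neg hv, ih hm' v]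
      rcases hq : (pvL data m).get? v with _ | p
      · rfl
      · obtain ⟨k, rfl, hk⟩ := pvL_bound data m v _ hq
        simp only [PySem.List.pyGetD_natCast]
        exact (pvC_stable data k m (m + 1) hk (by omega)).symm

-- A's foldl over enumerate equals pvA
theorem pvA_fold (data : List Int) (m : Nat) :
    (PySem.List.pyRange 1 (1 + (m : Int)) 1).foldl
        (fun w j => w.insert (data.getD j.toNat 0)
          (w.getD (data.getD j.toNat 0 - 1) 0 + w.getD (data.getD j.toNat 0 - 2) 0 +
           w.getD (data.getD j.toNat 0 - 3) 0))
        ((PySem.Dict.empty).insert 0 1)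
      = pvA data m := by
  induction m with
  | zero => simp [PySem.List.pyRange_one_eq_nil, pvA]
  | succ m ih =>
    have h1 : (1 : Int) + ((m + 1 : Nat) : Int) = (1 + (m : Int)) + 1 := by push_cast; ring
    rw [h1, PySem.List.pyRange_one_succ_right (by omega), List.foldl_append, ih]
    simp only [List.foldl, pvA]
    have ht : ((1 : Int) + (m : Int)).toNat = m + 1 := by omega
    rw [ht]

-- B's phase-1 foldl equals (pvL, pvP)
theorem pvLP_fold (data : List Int) (m : Nat) :
    (PySem.List.pyRange 1 (1 + (m : Int)) 1).foldl
      (fun (st : PySem.Dict Int Int × List (List Int)) j =>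
        let a := PySem.List.pyGetD data j 0
        let ps := ([1, 2, 3] : List Int).filterMap (fun d => st.1.get? (a - d))
        (st.1.insert a j, st.2.set j.toNat ps))
      ((PySem.Dict.empty).insert 0 0, List.replicate data.length [])
      = (pvL data m, pvP data m) := by
  induction m with
  | zero => simp [PySem.List.pyRange_one_eq_nil, pvL, pvP]
  | succ m ih =>
    have h1 : (1 : Int) + ((m + 1 : Nat) : Int) = (1 + (m : Int)) + 1 := by push_cast; ring
    rw [h1, PySem.List.pyRange_one_succ_right (by omega), List.foldl_append, ih]
    simp only [List.foldl]
    have hc : (1 : Int) + (m : Int) = ((m + 1 : Nat) : Int) := by push_cast; ring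
    rw [hc, PySem.List.pyGetD_natCast]
    simp [pvL, pvP, pvPs]

-- entries of the finished predecessor table
theorem pvP_get (data : List Int) (m k : Nat) (hk : k < m) (hlen : k + 1 < data.length) :
    (pvP data m).getD (k + 1) [] = pvPs data k := by
  induction m with
  | zero => omega
  | succ m ih =>
    simp only [pvP]
    by_cases hkm : k = m
    · subst hkm
      rw [List.getD_eq_getElem?_getD, List.getElem?_set_self (by rw [pvP_length]; omega)]
      rfl
    · rw [List.getD_eq_getElem?_getD, List.getElem?_set_ne (by omega),
        ← List.getD_eq_getElem?_getD, ih (by omega)]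

-- B's phase-2 foldl equals pvC
theorem pvC_fold (data : List Int) (M m : Nat) (hm : m ≤ M) (hM : M < data.length) :
    (PySem.List.pyRange 1 (1 + (m : Int)) 1).foldl
      (fun (c : List Int) j =>
        c.set j.toNat (((PySem.List.pyGetD (pvP data M) j []).map
          (fun p => PySem.List.pyGetD c p 0)).sum))
      ((1 : Int) :: List.replicate (data.length - 1) 0)
      = pvC data m := by
  induction m with
  | zero => simp [PySem.List.pyRange_one_eq_nil, pvC]
  | succ m ih =>
    have h1 : (1 : Int) + ((m + 1 : Nat) : Int) = (1 + (m : Int)) + 1 := by push_cast; ring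
    rw [h1, PySem.List.pyRange_one_succ_right (by omega), List.foldl_append, ih (by omega)]
    simp only [List.foldl]
    have hc : (1 : Int) + (m : Int) = ((m + 1 : Nat) : Int) := by push_cast; ring
    rw [hc, PySem.List.pyGetD_natCast, pvP_get data M m (by omega) (by omega)]
    simp [pvC]

-- ===== VERDICT (by name: the statement is the Claim_ definition above) =====
theorem find_distinct_ways_spec : Claim_equal_find_distinct_ways := by
  intro i data _hdom hne
  unfold Spec_find_distinct_ways find_distinct_ways find_distinct_ways_alt
  have hn : 1 ≤ data.length := by
    rcases data with _ | _ <;> simp_all [Pre_find_distinct_ways]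
  set n := data.length with hnd
  have hcast : (n : Int) = 1 + ((n - 1 : Nat) : Int) := by omega
  have hA : (PySem.List.enumerate data).foldl (fun w (p : Int × Int) =>
      if p.1 ≠ 0 then
        w.insert p.2 (w.getD (p.2 - 1) 0 + w.getD (p.2 - 2) 0 + w.getD (p.2 - 3) 0)
      else w) ((PySem.Dict.empty).insert 0 1) = pvA data (n - 1) := by
    rw [PySem.List.enumerate_eq_map_pyRange (d := 0), List.foldl_map]
    have hlen : PySem.List.len data = (n : Int) := by simp [← hnd]
    rw [hlen, PySem.List.pyRange_one_cons (by exact_mod_cast hn)]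
    simp only [List.foldl_cons, if_neg (by simp : ¬ ((0 : Int) ≠ 0))]
    rw [← pvA_fold data (n - 1), hcast]
    apply PySem.List.foldl_congr_mem
    intro w j hj
    have hj1 : 1 ≤ j := (PySem.List.mem_pyRange_one.mp hj).1
    have hjne : j ≠ 0 := by omega
    rw [if_pos hjne]
    obtain ⟨k, rfl⟩ : ∃ k : Nat, j = (k : Int) := ⟨j.toNat, by omega⟩
    simp
  have hLP : (PySem.List.pyRange 1 ((n : Nat) : Int) 1).foldl
      (fun (st : PySem.Dict Int Int × List (List Int)) j =>
        let a := PySem.List.pyGetD data j 0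
        let ps := ([1, 2, 3] : List Int).filterMap (fun d => st.1.get? (a - d))
        (st.1.insert a j, st.2.set j.toNat ps))
      ((PySem.Dict.empty).insert 0 0, List.replicate n [])
      = (pvL data (n - 1), pvP data (n - 1)) := by
    rw [hcast]
    exact pvLP_fold data (n - 1)
  have hC : (PySem.List.pyRange 1 ((n : Nat) : Int) 1).foldl
      (fun (c : List Int) j =>
        c.set j.toNat (((PySem.List.pyGetD (pvP data (n - 1)) j []).map
          (fun p => PySem.List.pyGetD c p 0)).sum))
      ((1 : Int) :: List.replicate (n - 1) 0)
      = pvC data (n - 1) := by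
    rw [hcast]
    exact pvC_fold data (n - 1) (n - 1) le_rfl (by omega)
  have hlast : PySem.List.pyGet? data (-1) = some (data.getD (n - 1) 0) := by
    rw [PySem.List.pyGet?_neg_one, List.getLast?_eq_getElem?,
      List.getD_eq_getElem _ _ (by omega)]
    exact List.getElem?_eq_getElem (by omega)
  simp only [hLP, hC, hA, hlast]
  have hinv := pv_invariant data (n - 1) (by omega) (data.getD (n - 1) 0)
  rw [hinv]
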